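-- pv_equiv track=rewrite | github.com/VasilijKolomiets/HomeWorks | Lesson_6_Universal_New_year_tree_functions_01.py | all_bloks_widths
-- ===== SOURCE A (Python) =====
-- def all_bloks_widths(heights: list) -> ():
--     """Обчислити максимальну ширину ялинки.
--
--     Args:
--         heights (list): [description]
--
--     Returns:
--         [type]: [description]
--     """
--     #
--     #       Аналіз даних з метою вирахувати ширину ялинки
--     #  Кожний рядок додає 2 до довжини попереднього рядка.
--     #  Тобто ширина першого низу буде:
--     #         2 + 2 * "кількість_рядків_1"
--     # для першої частини.
--     # Зменшуємо цю шрину на 2 з кожного краю для краси. Маємо: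
--     #         2 + 2 * "кількість_рядків_1" - 4
--     # Другий крок починається з цієї ширини і додає ще
--     #         2 * "кількість_рядків_2"
--     # рядків. Знову віднімаємо 4 зірочки (по 2 з краю).
--     # Тоді початкова ширина третьої частини буде:
--     #         2 + 2 * "кількість_рядків_1" - 4  +  2 * "кількість_рядків_2" - 4
--     # а "низ" третьої частинии буде дорівнювати:
--     #         2 + 2 * "кількість_рядків_1" - 4   \
--     #           + 2 * "кількість_рядків_2" - 4   \
--     #           + 2 * "кількість_рядків_3"
--     #
--     par_centre, i = 2, 0
--     bottom_widths = [ ]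
--     for height in heights:
--         bottom_width = par_centre + 2 * height
--         bottom_widths.append(bottom_width)
--         par_centre = bottom_width - 4
--     par_centre += 4
--     return bottom_widths, par_centre + 4
-- ===== SOURCE B (Python) =====
-- from itertools import accumulate
--
-- def all_bloks_widths(heights: list) -> ():
--     psum = list(accumulate(heights))
--     bottom_widths = [2 + 2 * psum[i] - 4 * i for i in range(len(heights))]
--     top = bottom_widths[-1] + 4 if heights else 10
--     return bottom_widths, top
-- ===== Notes on version B (the rewrite author's own statement) =====
-- stated objective: alternative
-- what changed: Replaces the running par_centre accumulator loop with a prefix-sum table plus an indexed closed-form map (width_i = 2 + 2*psum[i] - 4*i) and an explicit last-element formula for the top width.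
import Mathlib
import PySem

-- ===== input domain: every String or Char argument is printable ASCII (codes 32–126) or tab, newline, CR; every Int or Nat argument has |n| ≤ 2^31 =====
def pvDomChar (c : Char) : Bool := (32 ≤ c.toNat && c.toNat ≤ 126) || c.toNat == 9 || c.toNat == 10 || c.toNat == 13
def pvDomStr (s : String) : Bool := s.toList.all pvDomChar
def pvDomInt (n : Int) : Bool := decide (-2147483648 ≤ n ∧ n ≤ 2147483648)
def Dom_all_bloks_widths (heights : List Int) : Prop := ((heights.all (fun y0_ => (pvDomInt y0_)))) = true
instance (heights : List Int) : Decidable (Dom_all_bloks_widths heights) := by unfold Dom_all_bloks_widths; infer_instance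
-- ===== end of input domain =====

-- B replaces A's running par_centre accumulator with a prefix-sum table and an
-- indexed closed-form map (alternative decomposition, same O(n) cost).

-- ===== PORT A =====
-- A: running accumulator par_centre, appending each bottom width.
def all_bloks_widths (heights : List Int) : List Int × Int :=
  let st := heights.foldl
    (fun (st : Int × List Int) height =>
      let bottom_width := st.1 + 2 * height
      (bottom_width - 4, st.2 ++ [bottom_width]))
    (2, [])
  let par_centre := st.1 + 4
  (st.2, par_centre + 4)

-- ===== PORT B =====
-- B: prefix sums (itertools.accumulate) then an indexed comprehension.
def all_bloks_widths_alt (heights : List Int) : List Int × Int :=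
  let psum := (heights.foldl
    (fun (acc : Int × List Int) h => (acc.1 + h, acc.2 ++ [acc.1 + h]))
    (0, [])).2
  let bottom_widths := (PySem.List.pyRange 0 (heights.length : Int) 1).map
    (fun i => 2 + 2 * PySem.List.pyGetD psum i 0 - 4 * i)
  let top := if heights ≠ [] then PySem.List.pyGetD bottom_widths (-1) 0 + 4 else 10
  (bottom_widths, top)

-- ===== PRECONDITION & SPEC =====
def Spec_all_bloks_widths (heights : List Int) (out : List Int × Int) : Prop := out = all_bloks_widths_alt heights
instance (heights : List Int) (out : List Int × Int) : Decidable (Spec_all_bloks_widths heights out) := by unfold Spec_all_bloks_widths; infer_instance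

-- ===== CLAIM (what is proved, stated in full; the proofs are below) =====
def Claim_equal_all_bloks_widths : Prop := ∀ (heights : List Int), Dom_all_bloks_widths heights → Spec_all_bloks_widths heights (all_bloks_widths heights)

-- ===== LEMMAS AND PROOFS =====

-- reference list of bottom widths starting from centre c
def pvWidths (c : Int) : List Int → List Int
  | [] => []
  | h :: t => (c + 2 * h) :: pvWidths (c + 2 * h - 4) t

-- reference prefix sums starting from s
def pvPre (s : Int) : List Int → List Int
  | [] => []
  | h :: t => (s + h) :: pvPre (s + h) t

theorem pvWidths_length (c : Int) (xs : List Int) : (pvWidths c xs).length = xs.length := by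
  induction xs generalizing c with
  | nil => rfl
  | cons h t ih => simp [pvWidths, ih]

theorem foldA (xs : List Int) (c : Int) (acc : List Int) :
    xs.foldl (fun (st : Int × List Int) height =>
      (st.1 + 2 * height - 4, st.2 ++ [st.1 + 2 * height])) (c, acc)
    = (c + 2 * xs.sum - 4 * xs.length, acc ++ pvWidths c xs) := by
  induction xs generalizing c acc with
  | nil => simp [pvWidths]
  | cons h t ih =>
    simp only [List.foldl_cons, ih, pvWidths, List.sum_cons, List.length_cons, Prod.mk.injEq]
    refine ⟨by push_cast; ring, by simp⟩

theorem foldB (xs : List Int) (s : Int) (acc : List Int) :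
    xs.foldl (fun (acc : Int × List Int) h => (acc.1 + h, acc.2 ++ [acc.1 + h])) (s, acc)
    = (s + xs.sum, acc ++ pvPre s xs) := by
  induction xs generalizing s acc with
  | nil => simp [pvPre]
  | cons h t ih =>
    simp only [List.foldl_cons, ih, pvPre, List.sum_cons, Prod.mk.injEq]
    refine ⟨by ring, by simp⟩

theorem mapB (xs : List Int) (s c : Int) :
    (PySem.List.pyRange 0 (xs.length : Int) 1).map
      (fun i => c + 2 * PySem.List.pyGetD (pvPre s xs) i 0 - 4 * i)
    = pvWidths (c + 2 * s) xs := by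
  induction xs generalizing s c with
  | nil => simp [PySem.List.pyRange_one_eq_nil, pvWidths]
  | cons h t ih =>
    have hn : (0 : Int) < ((h :: t).length : Int) := by
      simp
    rw [PySem.List.pyRange_one_cons hn]
    simp only [List.map_cons, pvWidths, pvPre, zero_add, List.cons.injEq]
    refine ⟨?_, ?_⟩
    · simp only [PySem.List.pyGetD_zero_cons, mul_zero, sub_zero]
      ring
    · have hshift : PySem.List.pyRange 1 ((h :: t).length : Int) 1
          = (PySem.List.pyRange 0 (t.length : Int) 1).map (fun k => k + 1) := by
        rw [PySem.List.pyRange_one, PySem.List.pyRange_one]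
        have he : (((h :: t).length : Int) - 1).toNat = ((t.length : Int) - 0).toNat := by
          simp
        rw [he, List.map_map]
        apply List.map_congr_left
        intro k _hk
        simp [Function.comp]
        omega
      rw [hshift, List.map_map]
      have hih := ih (s + h) (c - 4)
      have hc : c - 4 + 2 * (s + h) = c + 2 * s + 2 * h - 4 := by ring
      rw [hc] at hih
      rw [← hih]
      apply List.map_congr_left
      intro i hi
      have h0 : (0 : Int) ≤ i := (PySem.List.mem_pyRange_one.mp hi).1
      obtain ⟨k, rfl⟩ : ∃ k : Nat, i = (k : Int) := ⟨i.toNat, by omega⟩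
      simp only [Function.comp]
      have h1 : ((k : Int) + 1) = ((k + 1 : Nat) : Int) := by push_cast; ring
      rw [h1, PySem.List.pyGetD_natCast, PySem.List.pyGetD_natCast]
      simp [List.getD]
      ring

theorem pvWidths_last (c : Int) (xs : List Int) (hne : xs ≠ []) :
    PySem.List.pyGetD (pvWidths c xs) (-1) 0 = c + 2 * xs.sum - 4 * ((xs.length : Int) - 1) := by
  induction xs generalizing c with
  | nil => exact absurd rfl hne
  | cons h t ih =>
    cases t with
    | nil =>
      simp only [pvWidths, List.sum_cons, List.sum_nil, List.length_cons, List.length_nil]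
      rw [PySem.List.pyGetD_neg_one _ 0 (show ([c + 2 * h] : List Int) ≠ [] by simp)]
      simp
    | cons h2 t2 =>
      have hne2 : (h2 :: t2) ≠ ([] : List Int) := by simp
      have hW : pvWidths (c + 2 * h - 4) (h2 :: t2) ≠ [] := by
        intro hcon
        have := pvWidths_length (c + 2 * h - 4) (h2 :: t2)
        rw [hcon] at this
        simp at this
      rw [show pvWidths c (h :: h2 :: t2)
            = (c + 2 * h) :: pvWidths (c + 2 * h - 4) (h2 :: t2) from rfl]
      rw [PySem.List.pyGetD_neg_one _ 0 (show ((c + 2 * h) :: pvWidths (c + 2 * h - 4) (h2 :: t2)) ≠ [] by simp)]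
      rw [List.getLast_cons hW, ← PySem.List.pyGetD_neg_one _ 0 hW]
      rw [ih (c + 2 * h - 4) hne2]
      simp [List.sum_cons, List.length_cons]
      ring

-- ===== VERDICT (by name: the statement is the Claim_ definition above) =====
theorem all_bloks_widths_spec : Claim_equal_all_bloks_widths := by
  intro heights _hdom
  unfold Spec_all_bloks_widths all_bloks_widths all_bloks_widths_alt
  simp only [foldA, foldB, List.nil_append]
  have hmap := mapB heights 0 2
  norm_num at hmap
  rw [hmap]
  cases heights with
  | nil => simp [pvWidths]
  | cons h t =>
    have hne : (h :: t) ≠ ([] : List Int) := by simp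
    simp only [if_pos hne]
    rw [pvWidths_last 2 (h :: t) hne]
    simp only [Prod.mk.injEq]
    exact ⟨trivial, by ring⟩
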